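-- pv_equiv track=rewrite | github.com/sisterdy/CodingTest | solutions/Profitah/2026-03-04/디스크 컨트롤러.py | solution
-- ===== SOURCE A (Python) =====
-- import heapq as controller  # 우선순위가 가장 높은 작업을 꺼내 실행시키는 우선순위 디스크 컨트롤러
--
-- def solution(jobs):
--     answer = 0
--     disk = 0 # 작업을 실행하는 하드디스크
--     time = 0 # 현재 시점
--     waiting = [] # 대기큐
--     idx = 0
--     n = len(jobs)
--
--     jobs.sort()
--
--     while idx < n or waiting: # idx가 n보다 작거나 웨이팅 대기큐가 비어있다면
--
--         # 현재 시간까지 들어온 작업을 힙에 추가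
--         while idx < n and jobs[idx][0] <= time:
--             request, work = jobs[idx]
--             controller.heappush(waiting, (work, request))
--             idx += 1
--
--         if waiting:
--             work, request = controller.heappop(waiting)
--             time += work
--             answer += time - request
--         else:
--             # idx < n 이 보장된 상태
--             time = jobs[idx][0]
--
--     return answer // n
-- ===== SOURCE B (Python) =====
-- def solution(jobs):
--     # Same SJF schedule without a heap: keep the arrived, unfinished jobs in a
--     # plain list (arrival order) and pick the shortest by a linear scan each round.
--     # Like A, this sorts `jobs` in place.
--     jobs.sort()
--     n = len(jobs)
--     waiting = []  # arrived but unfinished jobs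
--     idx = 0
--     time = 0
--     answer = 0
--     for _ in range(n):
--         while idx < n and jobs[idx][0] <= time:
--             waiting.append(jobs[idx])
--             idx += 1
--         if not waiting:
--             # nothing has arrived yet: jump to the next request time
--             time = jobs[idx][0]
--             while idx < n and jobs[idx][0] <= time:
--                 waiting.append(jobs[idx])
--                 idx += 1
--         b = 0
--         for i in range(len(waiting)):
--             if (waiting[i][1], waiting[i][0]) < (waiting[b][1], waiting[b][0]):
--                 b = i
--         request, work = waiting.pop(b)
--         time += work
--         answer += time - request
--     return answer // n
-- ===== Notes on version B (the rewrite author's own statement) =====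
-- stated objective: simpler
-- what changed: The heap-based waiting queue is replaced by a plain list of arrived jobs in arrival order with a linear argmin scan and pop per round (no priority-queue maintenance), and the outer event loop becomes a for-loop of exactly n rounds.
import Mathlib
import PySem

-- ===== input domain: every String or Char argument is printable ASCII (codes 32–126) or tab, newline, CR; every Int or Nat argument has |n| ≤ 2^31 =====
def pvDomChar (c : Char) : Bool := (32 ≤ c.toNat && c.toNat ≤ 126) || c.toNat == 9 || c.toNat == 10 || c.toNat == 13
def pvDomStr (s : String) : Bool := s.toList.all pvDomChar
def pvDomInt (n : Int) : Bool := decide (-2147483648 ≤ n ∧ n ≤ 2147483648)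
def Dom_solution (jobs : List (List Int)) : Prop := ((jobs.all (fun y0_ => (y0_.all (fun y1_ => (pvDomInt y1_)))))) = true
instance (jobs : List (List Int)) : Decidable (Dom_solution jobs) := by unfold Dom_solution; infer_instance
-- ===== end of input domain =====

-- B replaces A's heap with a plain list of arrived jobs and a linear argmin scan
-- (objective: simpler — no priority-queue maintenance). Both A and B sort `jobs`
-- in place (jobs.sort()); the equivalence proved here is about the return value.

-- Python's tuple/list `<` on the (length-2, integer) rows admitted by Pre_:
-- lexicographic comparison of the two components.
def lexPairLt (a b : Int × Int) : Bool :=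
  decide (a.1 < b.1) || (decide (a.1 = b.1) && decide (a.2 < b.2))

-- ===== PORT A =====
-- heapq.heappush / heappop (stdlib calls) are ported by their min-priority-queue
-- contract: the heap is represented as the ascending sorted list of its elements;
-- heappush = ordered insert, heappop = take the head (the minimum element).
def heappushS (w : List (Int × Int)) (x : Int × Int) : List (Int × Int) :=
  PySem.List.insertBy lexPairLt x w

-- A's inner while: push every job that has arrived by `time` (as (work, request)).
-- A's inner while: push every job that has arrived by `time` (as (work, request)).
-- `fuel` only bounds the recursion depth (the loop advances idx towards
-- L.length); callers always pass enough fuel, so it changes nothing else.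
def fillA (L : List (List Int)) (fuel : Nat) (idx : Nat) (time : Int)
    (w : List (Int × Int)) : Nat × List (Int × Int) :=
  match fuel with
  | 0 => (idx, w)
  | fuel + 1 =>
    if idx < L.length then
      let r := L.getD idx []
      if PySem.List.pyGetD r 0 0 ≤ time then
        fillA L fuel (idx + 1) time
          (heappushS w (PySem.List.pyGetD r 1 0, PySem.List.pyGetD r 0 0))
      else (idx, w)
    else (idx, w)

-- A's outer while loop.  The `else` branch (empty queue) is fused with the
-- inner-while refill and pop that Python performs on the very next iteration.
-- `fuel` only bounds the recursion depth; the loop stops by its own condition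
-- and solution passes fuel exceeding the loop's measure 2*len + |waiting|.
def loopA (L : List (List Int)) (fuel : Nat) (idx : Nat) (time answer : Int)
    (w : List (Int × Int)) : Int :=
  match fuel with
  | 0 => answer
  | fuel + 1 =>
    if idx < L.length ∨ w ≠ [] then
      match fillA L L.length idx time w with
      | (idx1, (work, request) :: rest) =>
          loopA L fuel idx1 (time + work) (answer + (time + work - request)) rest
      | (idx1, []) =>
          let t := PySem.List.pyGetD (L.getD idx1 []) 0 0
          match fillA L L.length idx1 t [] with
          | (idx2, (work, request) :: rest) =>
              loopA L fuel idx2 (t + work) (answer + (t + work - request)) rest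
          | (_, []) => answer
    else answer


def solution (jobs : List (List Int)) : Int :=
  -- jobs.sort(): Python's lexicographic list sort; on the rows admitted by
  -- Pre_ (length-2 integer lists) this is the sort by the key (row[0], row[1]).
  PySem.Int.floordiv
    (loopA (PySem.List.sorted2 jobs (fun r => PySem.List.pyGetD r 0 0)
      (fun r => PySem.List.pyGetD r 1 0)) (2 * jobs.length + 1) 0 0 0 [])
    (PySem.List.len jobs)

-- ===== PORT B =====
-- B's inner while: append every job that has arrived by `time` (row kept as
-- is).  `fuel` only bounds the recursion depth, as in fillA.
def fillB (L : List (List Int)) (fuel : Nat) (idx : Nat) (time : Int)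
    (w : List (List Int)) : Nat × List (List Int) :=
  match fuel with
  | 0 => (idx, w)
  | fuel + 1 =>
    if idx < L.length then
      let r := L.getD idx []
      if PySem.List.pyGetD r 0 0 ≤ time then fillB L fuel (idx + 1) time (w ++ [r])
      else (idx, w)
    else (idx, w)

-- B's linear scan: for i in range(len(w)): if (w[i][1], w[i][0]) < (w[b][1], w[b][0]): b = i
def bestIdx (w : List (List Int)) : Nat :=
  (List.range w.length).foldl (fun b i =>
    if lexPairLt (PySem.List.pyGetD (w.getD i []) 1 0, PySem.List.pyGetD (w.getD i []) 0 0)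
        (PySem.List.pyGetD (w.getD b []) 1 0, PySem.List.pyGetD (w.getD b []) 0 0)
    then i else b) 0

-- B's `for _ in range(n)` loop, counting the remaining iterations.
def loopB (L : List (List Int)) (k : Nat) (idx : Nat) (time answer : Int)
    (w : List (List Int)) : Int :=
  match k with
  | 0 => answer
  | k + 1 =>
    match fillB L L.length idx time w with
    | (idx1, w1) =>
      match (if w1.isEmpty then
               let t := PySem.List.pyGetD (L.getD idx1 []) 0 0
               match fillB L L.length idx1 t w1 with
               | (i2, w2) => (i2, t, w2)
             else (idx1, time, w1)) with
      | (idx2, t, w2) =>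
        match PySem.List.pop? w2 ((bestIdx w2 : Nat) : Int) with
        | some (r, w3) =>
            let request := PySem.List.pyGetD r 0 0
            let work := PySem.List.pyGetD r 1 0
            loopB L k idx2 (t + work) (answer + (t + work - request)) w3
        | none => answer  -- unreachable: w2 is never empty while iterations remain

def solution_alt (jobs : List (List Int)) : Int :=
  PySem.Int.floordiv
    (loopB (PySem.List.sorted2 jobs (fun r => PySem.List.pyGetD r 0 0)
      (fun r => PySem.List.pyGetD r 1 0)) jobs.length 0 0 0 [])
    (PySem.List.len jobs)

-- ===== PRECONDITION & SPEC =====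
-- Pre_ excludes exactly the inputs on which the Python A raises: the empty list
-- (ZeroDivisionError in `answer // n`) and lists with a row that is not a
-- length-2 list (ValueError in `request, work = jobs[idx]`).
def Pre_solution (jobs : List (List Int)) : Prop :=
  jobs ≠ [] ∧ ∀ r ∈ jobs, r.length = 2
instance (jobs : List (List Int)) : Decidable (Pre_solution jobs) := by
  unfold Pre_solution; infer_instance

def pvWitness_solution : List (List Int) := [[0, 3], [1, 9], [2, 6]]

def Spec_solution (jobs : List (List Int)) (out : Int) : Prop := out = solution_alt jobs
instance (jobs : List (List Int)) (out : Int) : Decidable (Spec_solution jobs out) := by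
  unfold Spec_solution; infer_instance

-- ===== CLAIM (what is proved, stated in full; the proofs are below) =====
def Claim_equal_solution : Prop :=
  ∀ (jobs : List (List Int)), Dom_solution jobs → Pre_solution jobs →
    Spec_solution jobs (solution jobs)

-- ===== LEMMAS AND PROOFS =====

-- (work, request) view of a row, as both ports extract it
def toPair (r : List Int) : Int × Int :=
  (PySem.List.pyGetD r 1 0, PySem.List.pyGetD r 0 0)

-- ascending (non-strict) order invariant of A's queue
def SortedW (w : List (Int × Int)) : Prop :=
  w.Pairwise (fun a b => lexPairLt b a = false)

def keyAt (w : List (List Int)) (i : Nat) : Int × Int := toPair (w.getD i [])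

theorem lex_true_iff (a b : Int × Int) :
    lexPairLt a b = true ↔ (a.1 < b.1 ∨ (a.1 = b.1 ∧ a.2 < b.2)) := by
  simp [lexPairLt]

theorem lex_false_iff (a b : Int × Int) :
    lexPairLt a b = false ↔ (b.1 < a.1 ∨ (b.1 = a.1 ∧ b.2 ≤ a.2)) := by
  simp [lexPairLt]; omega

theorem lex_le_trans {a b c : Int × Int} (h1 : lexPairLt b a = false)
    (h2 : lexPairLt c b = false) : lexPairLt c a = false := by
  rw [lex_false_iff] at *; omega

theorem lex_asymm {a b : Int × Int} (h : lexPairLt a b = true) :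
    lexPairLt b a = false := by
  rw [lex_true_iff] at h; rw [lex_false_iff]; omega

theorem lex_le_of_lt_of_le {a b c : Int × Int} (h1 : lexPairLt a b = true)
    (h2 : lexPairLt a c = false) : lexPairLt b c = false := by
  rw [lex_true_iff] at h1; rw [lex_false_iff] at *; omega

theorem lex_antisymm {a b : Int × Int} (h1 : lexPairLt a b = false)
    (h2 : lexPairLt b a = false) : a = b := by
  rw [lex_false_iff] at *
  obtain ⟨a1, a2⟩ := a; obtain ⟨b1, b2⟩ := b
  simp_all; omega

theorem lex_irrefl (a : Int × Int) : lexPairLt a a = false := by simp [lexPairLt]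

theorem heappushS_perm (w : List (Int × Int)) (x : Int × Int) :
    (heappushS w x).Perm (x :: w) := by
  unfold heappushS
  induction w with
  | nil => simp [PySem.List.insertBy]
  | cons y ys ih =>
    simp only [PySem.List.insertBy]
    split
    · exact List.Perm.refl _
    · exact (ih.cons y).trans (List.Perm.swap x y ys)

theorem heappushS_sorted (w : List (Int × Int)) (x : Int × Int) (hs : SortedW w) :
    SortedW (heappushS w x) := by
  unfold heappushS SortedW at *
  induction w with
  | nil => simp [PySem.List.insertBy]
  | cons y ys ih =>
    rw [List.pairwise_cons] at hs
    obtain ⟨hy, hys⟩ := hs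
    simp only [PySem.List.insertBy]
    split
    · rename_i hxy
      refine List.Pairwise.cons ?_ (List.Pairwise.cons hy hys)
      intro z hz
      rcases List.mem_cons.1 hz with rfl | hz
      · exact lex_asymm hxy
      · exact lex_le_trans (lex_asymm hxy) (hy z hz)
    · rename_i hxy
      refine List.Pairwise.cons ?_ (ih hys)
      intro z hz
      rcases (PySem.List.mem_insertBy _ _ _ _).1 hz with rfl | hz
      · simpa using hxy
      · exact hy z hz

theorem fillB_count (L : List (List Int)) (fuel : Nat) (idx : Nat) (time : Int)
    (w : List (List Int)) (h : idx ≤ L.length) :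
    (fillB L fuel idx time w).1 ≤ L.length ∧ idx ≤ (fillB L fuel idx time w).1 ∧
      (fillB L fuel idx time w).1 + w.length = idx + (fillB L fuel idx time w).2.length := by
  fun_induction fillB with
  | case1 => simp; omega
  | case2 idx w fuel hlt r hcond ih =>
    have := ih (by omega)
    simp at this ⊢
    omega
  | case3 => simp; omega
  | case4 => simp; omega

theorem fillB_advances (L : List (List Int)) (fuel : Nat) (idx : Nat) (time : Int)
    (w : List (List Int)) (hf : 0 < fuel)
    (h : idx < L.length) (hc : PySem.List.pyGetD (L.getD idx []) 0 0 ≤ time) :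
    idx < (fillB L fuel idx time w).1 := by
  cases fuel with
  | zero => omega
  | succ fuel =>
    have h1 := (fillB_count L fuel (idx + 1) time (w ++ [L.getD idx []]) (by omega)).2.1
    rw [fillB]
    simp only [h, if_pos, hc]
    omega

theorem fill_rel (L : List (List Int)) (fuel : Nat) :
    ∀ (idx : Nat) (time : Int) (wA : List (Int × Int)) (wB : List (List Int)),
    SortedW wA → wA.Perm (wB.map toPair) →
    (fillA L fuel idx time wA).1 = (fillB L fuel idx time wB).1 ∧
      SortedW (fillA L fuel idx time wA).2 ∧
      (fillA L fuel idx time wA).2.Perm ((fillB L fuel idx time wB).2.map toPair) := by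
  induction fuel with
  | zero => intro idx time wA wB hs hp; exact ⟨rfl, hs, hp⟩
  | succ fuel ih =>
    intro idx time wA wB hs hp
    rw [fillA, fillB]
    by_cases h : idx < L.length
    · simp only [h, if_pos]
      by_cases hc : PySem.List.pyGetD (L.getD idx []) 0 0 ≤ time
      · simp only [hc, if_pos]
        refine ih (idx + 1) time _ _ (heappushS_sorted _ _ hs) ?_
        refine (heappushS_perm wA _).trans ?_
        rw [List.map_append]
        exact (hp.cons _).trans (List.perm_append_singleton _ _).symm
      · simp only [hc, if_false]
        exact ⟨by simp, hs, hp⟩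
    · simp only [h, if_false]
      exact ⟨by simp, hs, hp⟩

theorem scan_aux (w : List (List Int)) (is : List Nat) :
    ∀ b0 : Nat, b0 < w.length → (∀ i ∈ is, i < w.length) →
      (is.foldl (fun b i => if lexPairLt (keyAt w i) (keyAt w b) then i else b) b0) < w.length ∧
      (∀ i ∈ is, lexPairLt (keyAt w i)
        (keyAt w (is.foldl (fun b i => if lexPairLt (keyAt w i) (keyAt w b) then i else b) b0)) = false) ∧
      lexPairLt (keyAt w b0)
        (keyAt w (is.foldl (fun b i => if lexPairLt (keyAt w i) (keyAt w b) then i else b) b0)) = false := by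
  induction is with
  | nil => intro b0 hb _; exact ⟨hb, by simp, lex_irrefl _⟩
  | cons i rest ih =>
    intro b0 hb hmem
    simp only [List.foldl_cons]
    by_cases hlt : lexPairLt (keyAt w i) (keyAt w b0) = true
    · rw [if_pos hlt]
      obtain ⟨h1, h2, h3⟩ := ih i (hmem i (by simp)) (fun j hj => hmem j (by simp [hj]))
      refine ⟨h1, ?_, lex_le_of_lt_of_le hlt h3⟩
      intro j hj
      rcases List.mem_cons.1 hj with rfl | hj
      · exact h3
      · exact h2 j hj
    · rw [if_neg hlt]
      obtain ⟨h1, h2, h3⟩ := ih b0 hb (fun j hj => hmem j (by simp [hj]))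
      refine ⟨h1, ?_, h3⟩
      intro j hj
      rcases List.mem_cons.1 hj with rfl | hj
      · exact lex_le_trans h3 (by simpa using hlt)
      · exact h2 j hj

theorem bestIdx_spec (w : List (List Int)) (hw : w ≠ []) :
    bestIdx w < w.length ∧
      ∀ i < w.length, lexPairLt (keyAt w i) (keyAt w (bestIdx w)) = false := by
  have hlen : 0 < w.length := List.length_pos_iff.2 hw
  have h := scan_aux w (List.range w.length) 0 hlen (by simp)
  have hfold : bestIdx w = (List.range w.length).foldl
      (fun b i => if lexPairLt (keyAt w i) (keyAt w b) then i else b) 0 := by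
    simp [bestIdx, keyAt, toPair]
  rw [hfold]
  exact ⟨h.1, fun i hi => h.2.1 i (List.mem_range.2 hi)⟩

theorem pop_step (p : Int × Int) (restA : List (Int × Int)) (wB : List (List Int))
    (hs : SortedW (p :: restA)) (hp : (p :: restA).Perm (wB.map toPair)) :
    bestIdx wB < wB.length ∧
      toPair (wB.getD (bestIdx wB) []) = p ∧
      ((wB.eraseIdx (bestIdx wB)).map toPair).Perm restA := by
  have hw : wB ≠ [] := by
    intro h; subst h; simpa using hp.length_eq
  obtain ⟨hb, hmin⟩ := bestIdx_spec wB hw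
  have hgetD : wB.getD (bestIdx wB) [] = wB[bestIdx wB] := List.getD_eq_getElem wB [] hb
  have hkey : keyAt wB (bestIdx wB) = toPair wB[bestIdx wB] := by rw [keyAt, hgetD]
  have hple : ∀ q ∈ wB.map toPair, lexPairLt q p = false := by
    intro q hq
    rcases List.mem_cons.1 (hp.symm.subset hq) with rfl | hq'
    · simp [lexPairLt]
    · exact (List.pairwise_cons.1 hs).1 q hq'
  have hpmem : p ∈ wB.map toPair := hp.subset (by simp)
  obtain ⟨j, hj, hjp⟩ := List.getElem_of_mem hpmem
  rw [List.getElem_map] at hjp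
  have hjlen : j < wB.length := by simpa using hj
  have h1 : lexPairLt p (keyAt wB (bestIdx wB)) = false := by
    have := hmin j hjlen
    rwa [keyAt, List.getD_eq_getElem wB [] hjlen, hjp] at this
  have h2 : lexPairLt (keyAt wB (bestIdx wB)) p = false := by
    apply hple
    rw [hkey]
    exact List.mem_map_of_mem (List.getElem_mem hb)
  have heq : toPair (wB.getD (bestIdx wB) []) = p := by
    rw [← keyAt]; exact lex_antisymm h2 h1
  refine ⟨hb, heq, ?_⟩
  have hb' : bestIdx wB < (wB.map toPair).length := by simpa using hb
  have hperm1 : (wB.map toPair).Perm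
      ((wB.map toPair)[bestIdx wB]'hb' :: (wB.map toPair).eraseIdx (bestIdx wB)) :=
    (List.getElem_cons_eraseIdx_perm hb').symm
  have hbval : (wB.map toPair)[bestIdx wB]'hb' = p := by
    rw [List.getElem_map, ← hgetD, heq]
  rw [hbval] at hperm1
  have h3 : (p :: restA).Perm (p :: (wB.map toPair).eraseIdx (bestIdx wB)) := hp.trans hperm1
  have h4 := h3.cons_inv.symm
  rwa [List.eraseIdx_map] at h4

theorem sortedW_tail {p : Int × Int} {rest : List (Int × Int)}
    (h : SortedW (p :: rest)) : SortedW rest := (List.pairwise_cons.1 h).2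

theorem pop?_elim (w : List (List Int)) (b : Nat) (hb : b < w.length) :
    PySem.List.pop? w (b : Int) = some (w[b], w.eraseIdx b) := by
  simp [PySem.List.pop?, PySem.List.pyIdx?, hb]

-- the simulation: A's event loop over the sorted heap equals B's n-round loop
-- over the unsorted arrived list, related by "same multiset of waiting jobs"
theorem main_loop (L : List (List Int)) :
    ∀ (k fuelA idx : Nat) (time answer : Int) (wA : List (Int × Int)) (wB : List (List Int)),
      k ≤ fuelA →
      SortedW wA → wA.Perm (wB.map toPair) → idx ≤ L.length →
      k + idx = L.length + wB.length →
      loopA L fuelA idx time answer wA = loopB L k idx time answer wB := by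
  intro k
  induction k with
  | zero =>
    intro fuelA idx time answer wA wB hfuel hs hp hle hcnt
    have hBnil : wB = [] := by
      cases wB with
      | nil => rfl
      | cons r rs => simp at hcnt; omega
    subst hBnil
    have hAnil : wA = [] := Eq.symm (List.Perm.nil_eq hp.symm)
    subst hAnil
    cases fuelA with
    | zero => rfl
    | succ fuelA => rw [loopA, if_neg (by simp; omega)]; rfl
  | succ k ih =>
    intro fuelA idx time answer wA wB hfuel hs hp hle hcnt
    obtain ⟨fuelA, rfl⟩ : ∃ f, fuelA = f + 1 := by
      cases fuelA with
      | zero => omega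
      | succ f => exact ⟨f, rfl⟩
    have hrelf := fill_rel L L.length idx time wA wB hs hp
    have hcntf := fillB_count L L.length idx time wB hle
    rcases hA : fillA L L.length idx time wA with ⟨idxA, w1A⟩
    rcases hB : fillB L L.length idx time wB with ⟨idx1, w1B⟩
    rw [hA, hB] at hrelf
    rw [hB] at hcntf
    simp only [] at hrelf hcntf
    obtain ⟨hidx, hs1, hp1⟩ := hrelf
    obtain ⟨hle1, hge1, hcnt1⟩ := hcntf
    subst hidx
    have hcond : idx < L.length ∨ wA ≠ [] := by
      rcases Nat.lt_or_ge idx L.length with h | h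
      · exact Or.inl h
      · right
        have hwB : wB ≠ [] := by
          intro hnil; subst hnil; simp at hcnt; omega
        intro hnil; subst hnil
        have := hp.length_eq
        simp at this
        exact hwB (List.eq_nil_of_length_eq_zero this.symm)
    rw [loopA, if_pos hcond, hA]
    conv_rhs => rw [loopB]
    rw [hB]
    dsimp only
    cases w1A with
    | cons pr rest =>
      obtain ⟨work, request⟩ := pr
      dsimp only
      have hw1B : w1B ≠ [] := by
        intro hnil; subst hnil; simp at hp1
      rw [if_neg (by simpa using hw1B)]
      obtain ⟨hb, hkey, hper⟩ := pop_step (work, request) rest w1B hs1 hp1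
      rw [pop?_elim w1B (bestIdx w1B) hb]
      have hget : w1B.getD (bestIdx w1B) [] = w1B[bestIdx w1B] := List.getD_eq_getElem w1B [] hb
      rw [hget] at hkey
      have hreq : PySem.List.pyGetD w1B[bestIdx w1B] 0 0 = request := by
        have := congrArg Prod.snd hkey; simpa [toPair] using this
      have hwork : PySem.List.pyGetD w1B[bestIdx w1B] 1 0 = work := by
        have := congrArg Prod.fst hkey; simpa [toPair] using this
      simp only [hreq, hwork]
      apply ih
      · omega
      · exact sortedW_tail hs1
      · exact hper.symm
      · exact hle1
      · have := List.length_eraseIdx_of_lt hb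
        have hlen1 : w1B.length ≥ 1 := by
          cases w1B with
          | nil => exact absurd rfl hw1B
          | cons a l => simp
        omega
    | nil =>
      have hw1B : w1B = [] := by
        have := hp1.length_eq
        simp at this
        exact List.eq_nil_of_length_eq_zero this.symm
      subst hw1B
      dsimp only
      rw [if_pos (by simp)]
      have hidxlt : idxA < L.length := by simp at hcnt1; omega
      have hrelf2 := fill_rel L L.length idxA (PySem.List.pyGetD (L.getD idxA []) 0 0) [] []
        (by simp [SortedW]) (by simp)
      have hcntf2 := fillB_count L L.length idxA (PySem.List.pyGetD (L.getD idxA []) 0 0) []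
        (by omega)
      have hadv := fillB_advances L L.length idxA (PySem.List.pyGetD (L.getD idxA []) 0 0) []
        (by omega) hidxlt le_rfl
      rcases hA2 : fillA L L.length idxA (PySem.List.pyGetD (L.getD idxA []) 0 0) [] with ⟨idxA2, w2A⟩
      rcases hB2 : fillB L L.length idxA (PySem.List.pyGetD (L.getD idxA []) 0 0) [] with ⟨idx2, w2B⟩
      rw [hA2, hB2] at hrelf2
      rw [hB2] at hcntf2 hadv
      simp only [] at hrelf2 hcntf2 hadv
      obtain ⟨hidx2, hs2, hp2⟩ := hrelf2
      obtain ⟨hle2, hge2, hcnt2⟩ := hcntf2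
      subst hidx2
      dsimp only
      cases w2A with
      | nil =>
        exfalso
        have := hp2.length_eq
        simp at this
        omega
      | cons pr2 rest2 =>
        obtain ⟨work, request⟩ := pr2
        obtain ⟨hb, hkey, hper⟩ := pop_step (work, request) rest2 w2B hs2 hp2
        rw [pop?_elim w2B (bestIdx w2B) hb]
        have hget : w2B.getD (bestIdx w2B) [] = w2B[bestIdx w2B] := List.getD_eq_getElem w2B [] hb
        rw [hget] at hkey
        have hreq : PySem.List.pyGetD w2B[bestIdx w2B] 0 0 = request := by
          have := congrArg Prod.snd hkey; simpa [toPair] using this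
        have hwork : PySem.List.pyGetD w2B[bestIdx w2B] 1 0 = work := by
          have := congrArg Prod.fst hkey; simpa [toPair] using this
        simp only [hreq, hwork]
        apply ih
        · omega
        · exact sortedW_tail hs2
        · exact hper.symm
        · exact hle2
        · have := List.length_eraseIdx_of_lt hb
          simp at hcnt1 hcnt2
          omega

-- ===== VERDICT (by name: the statement is the Claim_ definition above) =====
theorem solution_spec : Claim_equal_solution := by
  intro jobs _ _
  unfold Spec_solution solution solution_alt
  have hlen : (PySem.List.sorted2 jobs (fun r => PySem.List.pyGetD r 0 0)
      (fun r => PySem.List.pyGetD r 1 0)).length = jobs.length :=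
    (PySem.List.sorted2_perm jobs _ _ false).length_eq
  rw [main_loop _ jobs.length (2 * jobs.length + 1) 0 0 0 [] [] (by omega)
    (by simp [SortedW]) (by simp) (by simp) (by simp [hlen])]
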